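-- pv_equiv track=rewrite | github.com/dejvoss/retail-454-calendar | app/routes.py | count_weeks_in_year
-- ===== SOURCE A (Python) =====
-- def is_leap_year(year):
--     """Check if a given year is a leap year.
--
--     Args:
--         year (int): The year to be checked.
--
--     Returns:
--         bool: True if the year is a leap year, False otherwise.
--     """
--     if year < 1582:
--         return False
--     elif year % 100 == 0 and year % 400 == 0:
--         return True
--     elif year % 100 == 0 and year % 400 != 0:
--         return False
--     elif year % 4 == 0:
--         return True
--     else:
--         return False
--
-- def count_days_in_month(year, month):
--     """Count the number of days in a given month.
--
--     Args:
--         year (int): The year for which the number of days is to be counted.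
--         month (int): The month for which the number of days is to be counted.
--
--     Returns:
--         int: The number of days in the given month.
--     """
--     if month in [1, 3, 5, 7, 8, 10, 12]:
--         return 31
--     elif month in [4, 6, 9, 11]:
--         return 30
--     elif month == 2 and is_leap_year(year):
--         return 29
--     elif month == 2 and not is_leap_year(year):
--         return 28
--     else:
--         return 0
--
-- def count_days_in_year(year):
--     """Count the number of days in a given year.
--
--     Args:
--         year (int): The year for which the number of days is to be counted.
--
--     Returns:
--         int: The number of days in the given year.
--     """
--     days = 0
--     for month in range(1, 13):
--         days += count_days_in_month(year, month)
--     return days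
--
-- def count_weeks_in_year(year):
--     """Count the number of weeks in a given year.
--
--     Args:
--         year (int): The year for which the number of weeks is to be counted.
--
--     Returns:
--         int: The number of weeks in the given year.
--     """
--     past_years_of_53_weeks = [2006, 2012, 2017, 2023]
--     if year in past_years_of_53_weeks:
--         return 53
--     if max(past_years_of_53_weeks) > year > min(past_years_of_53_weeks):
--         return 52
--     if year < min(past_years_of_53_weeks):
--         number_of_days_left = 0
--         for year_nb in range(year, min(past_years_of_53_weeks), ):
--             days_in_year = count_days_in_year(year_nb)
--             number_of_days_left += days_in_year % 52 * 7
--         if number_of_days_left >= 4: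
--             return 53
--         else:
--             return 52
--     if year > max(past_years_of_53_weeks):
--         number_of_days_left = 0
--         for year_nb in range(max(past_years_of_53_weeks), year):
--             days_in_year = count_days_in_year(year_nb)
--             number_of_days_left += days_in_year % 52 * 7
--         if number_of_days_left >= 4:
--             return 53
--         else:
--             return 52
-- ===== SOURCE B (Python) =====
-- def count_weeks_in_year(year):
--     """Count the number of ISO weeks (52 or 53) in a given year.
--
--     A's accumulation loops over whole years always add at least 7 days
--     (365 % 52 * 7 = 7), so both loop branches always return 53; the whole
--     function collapses to a constant-time check.
--     """
--     return 52 if 2006 < year < 2023 and year not in (2012, 2017) else 53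
-- ===== Notes on version B (the rewrite author's own statement) =====
-- stated objective: faster
-- what changed: Replaced the per-year accumulation loops (whose summand 'days % 52 * 7' is always >= 7, so any non-empty loop already clears the >= 4 threshold and returns 53) by a constant-time range/membership test.
import Mathlib
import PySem

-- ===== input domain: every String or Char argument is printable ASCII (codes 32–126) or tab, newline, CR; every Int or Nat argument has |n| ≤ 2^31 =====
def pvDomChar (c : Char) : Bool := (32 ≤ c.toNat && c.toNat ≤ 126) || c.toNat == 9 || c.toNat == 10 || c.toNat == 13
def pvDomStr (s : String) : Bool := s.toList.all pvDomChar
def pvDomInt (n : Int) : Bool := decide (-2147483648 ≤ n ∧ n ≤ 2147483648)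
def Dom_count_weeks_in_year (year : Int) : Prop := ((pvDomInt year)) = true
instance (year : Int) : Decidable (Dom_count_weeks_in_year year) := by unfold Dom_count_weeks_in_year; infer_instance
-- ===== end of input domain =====

-- B replaces A's per-year accumulation loops (whose summand is always ≥ 7, so any non-empty
-- loop clears A's "≥ 4" threshold) by a constant-time range/membership test: faster.

-- ===== PORT A =====
def is_leap_year (year : Int) : Bool :=
  if year < 1582 then false
  else if PySem.Int.mod year 100 = 0 ∧ PySem.Int.mod year 400 = 0 then true
  else if PySem.Int.mod year 100 = 0 ∧ PySem.Int.mod year 400 ≠ 0 then false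
  else if PySem.Int.mod year 4 = 0 then true
  else false

def count_days_in_month (year : Int) (month : Int) : Int :=
  if ([1, 3, 5, 7, 8, 10, 12] : List Int).contains month then 31
  else if ([4, 6, 9, 11] : List Int).contains month then 30
  else if month = 2 ∧ is_leap_year year then 29
  else if month = 2 ∧ ¬ is_leap_year year then 28
  else 0

def count_days_in_year (year : Int) : Int :=
  (PySem.List.pyRange 1 13 1).foldl (fun days month => days + count_days_in_month year month) 0

def count_weeks_in_year (year : Int) : Int :=
  let past : List Int := [2006, 2012, 2017, 2023]
  if past.contains year then 53
  else if (PySem.List.max? past (fun x => x)).getD 0 > year ∧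
          year > (PySem.List.min? past (fun x => x)).getD 0 then 52
  else if year < (PySem.List.min? past (fun x => x)).getD 0 then
    (if (PySem.List.pyRange year ((PySem.List.min? past (fun x => x)).getD 0) 1).foldl
          (fun acc y => acc + PySem.Int.mod (count_days_in_year y) 52 * 7) 0 ≥ 4
     then 53 else 52)
  else if year > (PySem.List.max? past (fun x => x)).getD 0 then
    (if (PySem.List.pyRange ((PySem.List.max? past (fun x => x)).getD 0) year 1).foldl
          (fun acc y => acc + PySem.Int.mod (count_days_in_year y) 52 * 7) 0 ≥ 4
     then 53 else 52)
  else 0  -- unreachable: the four Python branches are exhaustive (Python would return None here)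

-- ===== PORT B =====
def count_weeks_in_year_alt (year : Int) : Int :=
  if 2006 < year ∧ year < 2023 ∧ year ≠ 2012 ∧ year ≠ 2017 then 52 else 53

-- ===== PRECONDITION & SPEC =====
def Spec_count_weeks_in_year (year : Int) (out : Int) : Prop := out = count_weeks_in_year_alt year
instance (year : Int) (out : Int) : Decidable (Spec_count_weeks_in_year year out) := by unfold Spec_count_weeks_in_year; infer_instance

-- ===== CLAIM (what is proved, stated in full; the proofs are below) =====
def Claim_equal_count_weeks_in_year : Prop := ∀ (year : Int), Dom_count_weeks_in_year year → Spec_count_weeks_in_year year (count_weeks_in_year year)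

-- ===== LEMMAS AND PROOFS =====

lemma days_in_year_eq (y : Int) :
    count_days_in_year y = if is_leap_year y then 366 else 365 := by
  have hr : PySem.List.pyRange 1 13 1 = [1,2,3,4,5,6,7,8,9,10,11,12] := by decide
  by_cases h : is_leap_year y = true <;>
    simp [count_days_in_year, hr, count_days_in_month, h]

lemma term_ge_seven (y : Int) : 7 ≤ PySem.Int.mod (count_days_in_year y) 52 * 7 := by
  rw [days_in_year_eq]
  split <;> decide

lemma foldl_term_ge (l : List Int) (acc : Int) :
    acc ≤ l.foldl (fun acc y => acc + PySem.Int.mod (count_days_in_year y) 52 * 7) acc := by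
  induction l generalizing acc with
  | nil => simp
  | cons y t ih =>
      simp only [List.foldl_cons]
      have h1 := term_ge_seven y
      have h2 := ih (acc + PySem.Int.mod (count_days_in_year y) 52 * 7)
      omega

lemma loop_ge_four {a b : Int} (hab : a < b) :
    4 ≤ (PySem.List.pyRange a b 1).foldl
          (fun acc y => acc + PySem.Int.mod (count_days_in_year y) 52 * 7) 0 := by
  rw [PySem.List.pyRange_one_cons hab]
  simp only [List.foldl_cons]
  have h1 := term_ge_seven a
  have h2 := foldl_term_ge (PySem.List.pyRange (a + 1) b 1)
    (0 + PySem.Int.mod (count_days_in_year a) 52 * 7)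
  omega

lemma min_past : (PySem.List.min? ([2006, 2012, 2017, 2023] : List Int) (fun x => x)).getD 0 = 2006 := by decide
lemma max_past : (PySem.List.max? ([2006, 2012, 2017, 2023] : List Int) (fun x => x)).getD 0 = 2023 := by decide

-- ===== VERDICT (by name: the statement is the Claim_ definition above) =====
theorem count_weeks_in_year_spec : Claim_equal_count_weeks_in_year := by
  intro year _
  unfold Spec_count_weeks_in_year count_weeks_in_year count_weeks_in_year_alt
  simp only [min_past, max_past]
  by_cases hin : ([2006, 2012, 2017, 2023] : List Int).contains year
  · simp only [hin, if_true]
    have : year = 2006 ∨ year = 2012 ∨ year = 2017 ∨ year = 2023 := by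
      have hm : year ∈ ([2006, 2012, 2017, 2023] : List Int) := by
        rw [← List.contains_iff_mem]; exact hin
      simpa [or_assoc] using hm
    rcases this with h | h | h | h <;> subst h <;> decide
  · have hne : year ≠ 2006 ∧ year ≠ 2012 ∧ year ≠ 2017 ∧ year ≠ 2023 := by
      constructor
      · intro h; exact hin (by subst h; decide)
      constructor
      · intro h; exact hin (by subst h; decide)
      constructor
      · intro h; exact hin (by subst h; decide)
      · intro h; exact hin (by subst h; decide)
    simp only [hin, if_false, Bool.false_eq_true]
    by_cases hmid : (2023 : Int) > year ∧ year > 2006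
    · rw [if_pos hmid, if_pos ⟨hmid.2, hmid.1, hne.2.1, hne.2.2.1⟩]
    · rw [if_neg hmid]
      by_cases hlt : year < 2006
      · rw [if_pos hlt, if_pos (loop_ge_four hlt),
            if_neg (by intro h; omega)]
      · have hgt : year > 2023 := by omega
        rw [if_neg hlt, if_pos hgt, if_pos (loop_ge_four hgt),
            if_neg (by intro h; omega)]
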